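-- pv_equiv track=rewrite | github.com/achieve00/CodingTest | 프로그래머스/LV1/대충 만든 자판.py | solution
-- ===== SOURCE A (Python) =====
-- def get_min_keymap_positions(keymap):
--     key_pos = dict()
--
--     for key in keymap:
--         for idx, ch in enumerate(key):
--             # 타수는 1-based
--             pos = idx + 1
--             if ch not in key_pos:
--                 key_pos[ch] = pos
--             else:
--                 key_pos[ch] = min(key_pos[ch], pos)
--     return key_pos
--
-- def solution(keymap, targets):
--     answer = []
--     # keymap
--     key = get_min_keymap_positions(keymap)
--
--     for target in targets:
--         cnt = 0
--         for t in target: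
--             if t not in key:
--                 cnt = -1
--                 break
--             cnt += key[t]
--         answer.append(cnt)
--
--     return answer
-- ===== SOURCE B (Python) =====
-- def solution(keymap, targets):
--     # No eager per-position dictionary: positions are found on demand with str.find,
--     # scanning the keymaps only for characters the targets actually ask about.
--     best = {}  # lazy cache: ch -> minimal 1-based position, or None if unreachable
--     answer = []
--     for target in targets:
--         cnt = 0
--         for ch in target:
--             if ch not in best:
--                 b = None
--                 for km in keymap:
--                     i = km.find(ch)
--                     if i != -1 and (b is None or i + 1 < b):
--                         b = i + 1
--                 best[ch] = b
--             b = best[ch]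
--             if b is None:
--                 cnt = -1
--                 break
--             cnt += b
--         answer.append(cnt)
--     return answer
-- ===== Notes on version B (the rewrite author's own statement) =====
-- stated objective: alternative
-- what changed: Replaces A's eager dictionary of minimal positions (built by enumerating every keymap character) with a lazy, target-driven cache: each character's minimal 1-based position is computed on first use by scanning the keymaps with str.find.
import Mathlib
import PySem

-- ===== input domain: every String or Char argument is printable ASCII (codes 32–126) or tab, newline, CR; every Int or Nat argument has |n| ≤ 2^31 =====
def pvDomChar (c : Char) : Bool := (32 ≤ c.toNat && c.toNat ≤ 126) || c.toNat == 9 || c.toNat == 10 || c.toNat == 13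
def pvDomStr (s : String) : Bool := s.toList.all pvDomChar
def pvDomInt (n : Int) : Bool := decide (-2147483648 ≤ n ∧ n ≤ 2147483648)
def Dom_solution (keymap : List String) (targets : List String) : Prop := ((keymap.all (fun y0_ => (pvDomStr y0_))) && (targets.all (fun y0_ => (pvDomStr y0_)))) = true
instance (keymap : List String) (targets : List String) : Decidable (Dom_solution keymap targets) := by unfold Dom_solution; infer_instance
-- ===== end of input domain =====

-- B drops A's eager per-character position dictionary: it scans the keymaps on demand with
-- str.find, only for characters the targets ask about, caching results lazily (alternative).

-- ===== PORT A =====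
-- get_min_keymap_positions: dict of minimal 1-based position per char, built by nested loops
def getMinKeymapPositions (keymap : List String) : PySem.Dict Char Int :=
  keymap.foldl
    (fun d key =>
      (PySem.List.enumerate key.toList 0).foldl
        (fun d p =>
          if d.contains p.2 = false then d.insert p.2 (p.1 + 1)
          else d.insert p.2 (min (d.getD p.2 0) (p.1 + 1)))
        d)
    PySem.Dict.empty

-- the inner 'for t in target' loop with its break (cnt = -1)
def tallyA (key : PySem.Dict Char Int) : List Char → Int → Int
  | [], cnt => cnt
  | t :: rest, cnt =>
    if key.contains t = false then -1
    else tallyA key rest (cnt + key.getD t 0)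

def solution (keymap : List String) (targets : List String) : List Int :=
  let key := getMinKeymapPositions keymap
  targets.foldl (fun answer target => answer ++ [tallyA key target.toList 0]) []

-- ===== PORT B =====
-- best = None; for km in keymap: i = km.find(ch); if i != -1 and (best is None or i+1 < best): best = i+1
def bestPos (keymap : List String) (ch : Char) : Option Int :=
  keymap.foldl
    (fun best km =>
      let i := PySem.Str.find km (String.singleton ch)
      if i = -1 then best
      else
        match best with
        | none => some (i + 1)
        | some b => if i + 1 < b then some (i + 1) else best)
    none

-- the inner 'for ch in target' loop with its break (cnt = -1), threading the lazy cache
def tallyB (keymap : List String) : List Char → Int → PySem.Dict Char (Option Int) → Int × PySem.Dict Char (Option Int)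
  | [], cnt, best => (cnt, best)
  | ch :: rest, cnt, best =>
    let best' := if best.contains ch = false then best.insert ch (bestPos keymap ch) else best
    match best'.getD ch none with
    | none => (-1, best')
    | some b => tallyB keymap rest (cnt + b) best'

def solution_alt (keymap : List String) (targets : List String) : List Int :=
  (targets.foldl
    (fun acc target =>
      let r := tallyB keymap target.toList 0 acc.2
      (acc.1 ++ [r.1], r.2))
    (([] : List Int), (PySem.Dict.empty : PySem.Dict Char (Option Int)))).1

-- ===== PRECONDITION & SPEC =====
def Spec_solution (keymap : List String) (targets : List String) (out : List Int) : Prop := out = solution_alt keymap targets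
instance (keymap : List String) (targets : List String) (out : List Int) : Decidable (Spec_solution keymap targets out) := by unfold Spec_solution; infer_instance

-- ===== CLAIM (what is proved, stated in full; the proofs are below) =====
def Claim_equal_solution : Prop := ∀ (keymap : List String) (targets : List String), Dom_solution keymap targets → Spec_solution keymap targets (solution keymap targets)

-- ===== LEMMAS AND PROOFS =====

-- option-min: combine an old optional minimum with a new optional candidate
def omin : Option Int → Option Int → Option Int
  | none, b => b
  | some v, none => some v
  | some v, some w => some (min v w)

-- per-keymap candidate of B: first occurrence of c, 1-based, none if absent
def cand (s : List Char) (c : Char) : Option Int :=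
  if PySem.Chars.find s [c] = -1 then none else some (PySem.Chars.find s [c] + 1)

-- A's inner-loop selector: the 1-based positions of c contributed by one keymap
def sel (c : Char) (p : Int × Char) : Option Int :=
  if p.2 = c then some (p.1 + 1) else none

theorem omin_none_right (a : Option Int) : omin a none = a := by
  cases a <;> rfl

theorem omin_assoc (a b c : Option Int) : omin (omin a b) c = omin a (omin b c) := by
  cases a <;> cases b <;> cases c <;> simp [omin, min_assoc]

theorem min?_cons_omin (x : Int) (xs : List Int) : (x :: xs).min? = omin (some x) xs.min? := by
  cases xs with
  | nil => rfl
  | cons y ys =>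
    simp only [List.min?_cons', omin]
    rw [List.foldl_cons, List.foldl_assoc]

theorem min?_append_omin (xs ys : List Int) : (xs ++ ys).min? = omin xs.min? ys.min? := by
  induction xs with
  | nil => simp [omin]
  | cons x xs ih =>
    rw [List.cons_append, min?_cons_omin, ih, min?_cons_omin, omin_assoc]

-- characterization of A's inner enumerate loop on an arbitrary starting dict
theorem inner_get? (ps : List (Int × Char)) (d : PySem.Dict Char Int) (c : Char) :
    ((ps.foldl
        (fun d p =>
          if d.contains p.2 = false then d.insert p.2 (p.1 + 1)
          else d.insert p.2 (min (d.getD p.2 0) (p.1 + 1)))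
        d).get? c)
      = omin (d.get? c) ((ps.filterMap (sel c)).min?) := by
  induction ps generalizing d with
  | nil => simp [omin_none_right]
  | cons p ps ih =>
    rw [List.foldl_cons, List.filterMap_cons, ih]
    by_cases hc : p.2 = c
    · simp only [sel, hc, if_true]
      rw [min?_cons_omin, ← omin_assoc]
      congr 1
      by_cases hcont : d.contains c = false
      · rw [if_pos hcont, PySem.Dict.get?_insert, if_pos rfl,
            (PySem.Dict.get?_eq_none_iff_contains d c).mpr hcont]
        rfl
      · rw [if_neg hcont, PySem.Dict.get?_insert, if_pos rfl]
        cases hg : d.get? c with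
        | none => exact absurd ((PySem.Dict.get?_eq_none_iff_contains d c).mp hg) hcont
        | some v => simp [PySem.Dict.getD_eq_get?_getD, hg, omin]
    · rw [show sel c p = none from if_neg hc]
      congr 1
      split_ifs with h
      · rw [PySem.Dict.get?_insert, if_neg (fun he => hc he.symm)]
      · rw [PySem.Dict.get?_insert, if_neg (fun he => hc he.symm)]

-- membership in one keymap's position list
theorem mem_occ_iff (x : Int) (s : List Char) (c : Char) :
    x ∈ (PySem.List.enumerate s 0).filterMap (sel c)
      ↔ ∃ (k : Nat) (h : k < s.length), s[k] = c ∧ x = (k : Int) + 1 := by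
  simp only [List.mem_filterMap, PySem.List.mem_enumerate_iff, sel]
  constructor
  · rintro ⟨⟨i, a⟩, ⟨k, hk, hp⟩, hsel⟩
    cases hp
    split_ifs at hsel with h
    exact ⟨k, hk, h, by simpa using hsel.symm⟩
  · rintro ⟨k, hk, hc, hx⟩
    exact ⟨((k : Int), s[k]), ⟨k, hk, by simp⟩, by simp [hc, hx]⟩

-- [c] is a prefix of s.drop i exactly when s[i] is c
theorem singleton_prefix_drop (c : Char) (s : List Char) (i : Nat) :
    [c] <+: s.drop i ↔ s[i]? = some c := by
  constructor
  · rintro ⟨t, ht⟩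
    have h : (s.drop i).head? = some c := by rw [← ht]; rfl
    rwa [List.head?_drop] at h
  · intro h
    refine ⟨(s.drop i).tail, ?_⟩
    have h' : (s.drop i).head? = some c := by rwa [List.head?_drop]
    cases hd : s.drop i with
    | nil => simp [hd] at h'
    | cons a t => simp [hd] at h' ⊢; simpa using h'.symm

-- one keymap's minimum position IS its str.find-based candidate
theorem occ_min?_eq_cand (s : List Char) (c : Char) :
    ((PySem.List.enumerate s 0).filterMap (sel c)).min? = cand s c := by
  by_cases hf : PySem.Chars.find s [c] = -1
  · rw [cand, if_pos hf, List.min?_eq_none_iff, List.filterMap_eq_nil_iff]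
    have hmem : c ∉ s := fun hm =>
      ((PySem.Chars.find_eq_neg_one_iff s [c]).mp hf) ((List.singleton_infix_iff c s).mpr hm)
    rintro ⟨i, a⟩ hp
    simp only [PySem.List.mem_enumerate_iff] at hp
    rcases hp with ⟨k, hk, hpe⟩
    cases hpe
    exact if_neg (fun hac : s[k] = c => hmem (hac ▸ List.getElem_mem hk))
  · have h0 : 0 ≤ PySem.Chars.find s [c] := by
      have := PySem.Chars.neg_one_le_find (s := s) (sub := [c])
      omega
    obtain ⟨hpre, hmin⟩ := PySem.Chars.find_spec h0
    set n : Nat := (PySem.Chars.find s [c]).toNat with hn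
    have hns : n < s.length := by
      rcases (singleton_prefix_drop c s n).mp hpre with hg
      exact (List.getElem?_eq_some_iff.mp hg).1
    have hsn : s[n] = c := by
      rcases List.getElem?_eq_some_iff.mp ((singleton_prefix_drop c s n).mp hpre) with ⟨h1, h2⟩
      exact h2
    rw [cand, if_neg hf]
    have : PySem.Chars.find s [c] + 1 = (n : Int) + 1 := by omega
    rw [this, List.min?_eq_some_iff_subtype]
    constructor
    · exact (mem_occ_iff _ s c).mpr ⟨n, hns, hsn, rfl⟩
    · intro b hb
      rcases (mem_occ_iff b s c).mp hb with ⟨k, hk, hkc, hkb⟩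
      have hkn : ¬ k < n := fun hlt =>
        hmin k hlt ((singleton_prefix_drop c s k).mpr (by simp [hk, hkc]))
      omega

-- flatMap minimum as a left fold of omin
theorem flatMap_min?_foldl (f : String → List Int) (l : List String) :
    ∀ a : Option Int,
      l.foldl (fun a km => omin a (f km).min?) a = omin a ((l.flatMap f).min?) := by
  induction l with
  | nil => intro a; simp [omin_none_right]
  | cons km kms ih =>
    intro a
    rw [List.foldl_cons, ih, List.flatMap_cons, min?_append_omin, omin_assoc]

-- B's scan is the omin-fold of the per-keymap candidates
theorem bestPos_eq_foldl_cand (keymap : List String) (ch : Char) :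
    bestPos keymap ch = keymap.foldl (fun best km => omin best (cand km.toList ch)) none := by
  rw [bestPos]
  congr 1
  funext best km
  show (let i := PySem.Str.find km (String.singleton ch); _) = _
  have hs : PySem.Str.find km (String.singleton ch) = PySem.Chars.find km.toList [ch] := by simp
  simp only [hs, cand]
  by_cases hf : PySem.Chars.find km.toList [ch] = -1
  · simp [hf, omin_none_right]
  · cases best with
    | none => simp [hf, omin]
    | some b =>
      simp only [hf, if_false, omin]
      rcases lt_or_ge (PySem.Chars.find km.toList [ch] + 1) b with h | h
      · rw [if_pos h]; rw [min_eq_right (le_of_lt h)]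
      · rw [if_neg (not_lt.mpr h)]; rw [min_eq_left h]

-- A's dictionary lookup equals B's direct scan
theorem key_get?_eq_bestPos (keymap : List String) (c : Char) :
    (getMinKeymapPositions keymap).get? c = bestPos keymap c := by
  suffices h : ∀ (d : PySem.Dict Char Int),
      ((keymap.foldl
          (fun d key =>
            (PySem.List.enumerate key.toList 0).foldl
              (fun d p =>
                if d.contains p.2 = false then d.insert p.2 (p.1 + 1)
                else d.insert p.2 (min (d.getD p.2 0) (p.1 + 1)))
              d)
          d).get? c)
        = omin (d.get? c)
            ((keymap.flatMap (fun km => (PySem.List.enumerate km.toList 0).filterMap (sel c))).min?) by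
    rw [getMinKeymapPositions, bestPos_eq_foldl_cand, h PySem.Dict.empty, PySem.Dict.get?_empty]
    have hfns : ∀ km : String, cand km.toList c = ((PySem.List.enumerate km.toList 0).filterMap (sel c)).min? :=
      fun km => (occ_min?_eq_cand km.toList c).symm
    calc omin none ((keymap.flatMap (fun km => (PySem.List.enumerate km.toList 0).filterMap (sel c))).min?)
        = keymap.foldl (fun a km => omin a ((PySem.List.enumerate km.toList 0).filterMap (sel c)).min?) none := by
          rw [flatMap_min?_foldl (fun km => (PySem.List.enumerate km.toList 0).filterMap (sel c)) keymap none]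
      _ = keymap.foldl (fun best km => omin best (cand km.toList c)) none := by
          congr 1; funext a km; rw [hfns km]
  induction keymap with
  | nil => intro d; simp [omin_none_right]
  | cons km kms ih =>
    intro d
    rw [List.foldl_cons, ih, inner_get?, List.flatMap_cons, min?_append_omin, omin_assoc]

-- cache invariant: every stored entry is the true scan result
def CacheInv (keymap : List String) (best : PySem.Dict Char (Option Int)) : Prop :=
  ∀ ch v, best.get? ch = some v → v = bestPos keymap ch

-- one cache-fill step preserves the invariant and serves the true value
theorem cacheInv_step (keymap : List String) (best : PySem.Dict Char (Option Int)) (ch : Char)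
    (h : CacheInv keymap best) :
    CacheInv keymap (if best.contains ch = false then best.insert ch (bestPos keymap ch) else best) := by
  split_ifs with hc
  · intro c v hg
    rw [PySem.Dict.get?_insert] at hg
    split_ifs at hg with hce
    · cases hg; exact hce ▸ rfl
    · exact h c v hg
  · exact h

theorem getD_step (keymap : List String) (best : PySem.Dict Char (Option Int)) (ch : Char)
    (h : CacheInv keymap best) :
    ((if best.contains ch = false then best.insert ch (bestPos keymap ch) else best).getD ch none)
      = bestPos keymap ch := by
  split_ifs with hc
  · rw [PySem.Dict.getD_eq_get?_getD, PySem.Dict.get?_insert, if_pos rfl, Option.getD_some]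
  · cases hg : best.get? ch with
    | none => exact absurd ((PySem.Dict.get?_eq_none_iff_contains best ch).mp hg) hc
    | some v => rw [PySem.Dict.getD_eq_get?_getD, hg, Option.getD_some, h ch v hg]

-- the memoised target loop returns A's count and keeps the invariant
theorem tallyB_eq (keymap : List String) (chars : List Char) :
    ∀ (cnt : Int) (best : PySem.Dict Char (Option Int)), CacheInv keymap best →
      (tallyB keymap chars cnt best).1 = tallyA (getMinKeymapPositions keymap) chars cnt
        ∧ CacheInv keymap (tallyB keymap chars cnt best).2 := by
  induction chars with
  | nil => exact fun cnt best h => ⟨rfl, h⟩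
  | cons t rest ih =>
    intro cnt best h
    rw [tallyA, tallyB]
    have hinv' := cacheInv_step keymap best t h
    have hb := getD_step keymap best t h
    rw [hb]
    cases hbp : bestPos keymap t with
    | none =>
      have hg : (getMinKeymapPositions keymap).get? t = none := by
        rw [key_get?_eq_bestPos, hbp]
      rw [hbp] at hinv'
      exact ⟨by rw [if_pos ((PySem.Dict.get?_eq_none_iff_contains _ t).mp hg)], hinv'⟩
    | some v =>
      have hg : (getMinKeymapPositions keymap).get? t = some v := by
        rw [key_get?_eq_bestPos, hbp]
      have hcont : (getMinKeymapPositions keymap).contains t ≠ false := by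
        intro hc
        rw [(PySem.Dict.get?_eq_none_iff_contains _ t).mpr hc] at hg
        cases hg
      rw [if_neg hcont, PySem.Dict.getD_eq_get?_getD, hg, Option.getD_some]
      rw [hbp] at hinv'
      exact ih (cnt + v) _ hinv'

-- the outer target fold, threading the cache
theorem fold_eq (keymap : List String) (targets : List String) :
    ∀ (acc : List Int) (best : PySem.Dict Char (Option Int)), CacheInv keymap best →
      ((targets.foldl
          (fun acc target =>
            let r := tallyB keymap target.toList 0 acc.2
            (acc.1 ++ [r.1], r.2))
          (acc, best)).1)
        = targets.foldl
            (fun answer target => answer ++ [tallyA (getMinKeymapPositions keymap) target.toList 0]) acc := by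
  induction targets with
  | nil => exact fun acc best _ => rfl
  | cons target rest ih =>
    intro acc best h
    rw [List.foldl_cons, List.foldl_cons]
    obtain ⟨h1, h2⟩ := tallyB_eq keymap target.toList 0 best h
    rw [show (let r := tallyB keymap target.toList 0 (acc, best).2;
              ((acc, best).1 ++ [r.1], r.2))
          = (acc ++ [tallyA (getMinKeymapPositions keymap) target.toList 0],
             (tallyB keymap target.toList 0 best).2) from by simp [h1]]
    exact ih _ _ h2

-- ===== VERDICT (by name: the statement is the Claim_ definition above) =====
theorem solution_spec : Claim_equal_solution := by
  intro keymap targets _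
  show solution keymap targets = solution_alt keymap targets
  simp only [solution, solution_alt]
  exact (fold_eq keymap targets [] PySem.Dict.empty
    (fun ch v hg => by rw [PySem.Dict.get?_empty] at hg; cases hg)).symm
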